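-- pv_equiv track=rewrite | github.com/rifle-ak/Bastion-Server | agent/tools/mod_conflict_check.py | _detect_game_type
-- ===== SOURCE A (Python) =====
-- def _detect_game_type(file_listing: str, log_text: str) -> str | None:
--     """Auto-detect game type from container files and log output.
--
--     Examines directory listings and log content for game-specific markers.
--     Returns one of: 'minecraft_java', 'minecraft_bedrock', 'rust', 'source',
--     'valheim', 'ark', 'terraria', or None if undetectable.
--     """
--     combined = (file_listing + "\n" + log_text).lower()
--
--     # Minecraft Java — look for Bukkit/Spigot/Paper/Purpur markers or plugins/ dir
--     if any(marker in combined for marker in [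
--         "bukkit", "spigot", "paper", "purpur", "plugin.yml",
--         "/data/plugins/", "/server/plugins/", "minecraft server",
--         "[server thread/", "loading libraries",
--     ]):
--         return "minecraft_java"
--
--     # Minecraft Bedrock — look for bedrock-specific markers
--     if any(marker in combined for marker in [
--         "bedrock_server", "behavior_packs", "resource_packs",
--         "bedrock dedicated server",
--     ]):
--         return "minecraft_bedrock"
--
--     # Rust (Oxide/uMod)
--     if any(marker in combined for marker in [
--         "/oxide/", "umod", "oxide.plugins", "rustdedicated",
--         "rust dedicated server", "/oxide/plugins/",
--     ]):
--         return "rust"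
--
--     # Source engine (CS2, Garry's Mod, TF2)
--     if any(marker in combined for marker in [
--         "sourcemod", "metamod", "/addons/sourcemod/", "srcds",
--         "source dedicated server", "/csgo/", "/garrysmod/",
--     ]):
--         return "source"
--
--     # Valheim
--     if any(marker in combined for marker in [
--         "valheim", "bepinex", "/bepinex/plugins/", "valheim dedicated",
--     ]):
--         return "valheim"
--
--     # ARK
--     if any(marker in combined for marker in [
--         "arkserver", "shootergame", "ark dedicated",
--         "/shootergame/", "arksurvival",
--     ]):
--         return "ark"
--
--     # Terraria
--     if any(marker in combined for marker in [
--         "tshock", "terraria", "/serverplugins/", "terrariaserver",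
--     ]):
--         return "terraria"
--
--     return None
-- ===== SOURCE B (Python) =====
-- _RULES = [
--     ("minecraft_java", [
--         "bukkit", "spigot", "paper", "purpur", "plugin.yml",
--         "/data/plugins/", "/server/plugins/", "minecraft server",
--         "[server thread/", "loading libraries",
--     ]),
--     ("minecraft_bedrock", [
--         "bedrock_server", "behavior_packs", "resource_packs",
--         "bedrock dedicated server",
--     ]),
--     ("rust", [
--         "/oxide/", "umod", "oxide.plugins", "rustdedicated",
--         "rust dedicated server", "/oxide/plugins/",
--     ]),
--     ("source", [
--         "sourcemod", "metamod", "/addons/sourcemod/", "srcds",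
--         "source dedicated server", "/csgo/", "/garrysmod/",
--     ]),
--     ("valheim", [
--         "valheim", "bepinex", "/bepinex/plugins/", "valheim dedicated",
--     ]),
--     ("ark", [
--         "arkserver", "shootergame", "ark dedicated",
--         "/shootergame/", "arksurvival",
--     ]),
--     ("terraria", [
--         "tshock", "terraria", "/serverplugins/", "terrariaserver",
--     ]),
-- ]
--
-- # flattened (priority, marker) pairs, and a first-character index over them
-- _PAIRS = [(prio, m) for prio, (_game, markers) in enumerate(_RULES) for m in markers]
-- _BY_FIRST = {}
-- for _prio, _m in _PAIRS:
--     _BY_FIRST[_m[0]] = _BY_FIRST.get(_m[0], []) + [(_prio, _m)]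
--
--
-- def _detect_game_type(file_listing: str, log_text: str):
--     combined = (file_listing + "\n" + log_text).lower()
--     # one positional scan: at each index, try only the markers whose first
--     # character matches, and keep the smallest matched rule priority
--     best = None
--     for i in range(len(combined)):
--         for prio, marker in _BY_FIRST.get(combined[i], []):
--             if combined.startswith(marker, i):
--                 if best is None or prio < best:
--                     best = prio
--     return None if best is None else _RULES[best][0]
-- ===== Notes on version B (the rewrite author's own statement) =====
-- stated objective: alternative
-- what changed: Replaced the per-marker substring-search if-cascade by a single left-to-right positional scan of the combined text that uses a first-character bucket index of flattened (priority, marker) pairs, tests startswith at each position, keeps the minimum matched rule priority, and finally maps it back to the rule table.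
import Mathlib
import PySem

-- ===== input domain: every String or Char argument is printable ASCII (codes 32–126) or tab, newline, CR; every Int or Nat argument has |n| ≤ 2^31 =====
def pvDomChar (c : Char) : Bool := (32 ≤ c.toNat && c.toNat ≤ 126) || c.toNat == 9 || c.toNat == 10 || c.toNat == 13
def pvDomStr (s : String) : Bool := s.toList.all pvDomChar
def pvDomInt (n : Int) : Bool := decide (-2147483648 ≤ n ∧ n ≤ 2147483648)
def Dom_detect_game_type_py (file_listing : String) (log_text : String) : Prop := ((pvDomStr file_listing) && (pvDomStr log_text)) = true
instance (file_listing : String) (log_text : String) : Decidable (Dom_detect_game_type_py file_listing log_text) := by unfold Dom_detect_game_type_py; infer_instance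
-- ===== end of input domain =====

-- B replaces A's per-marker substring-search cascade by a different algorithm: one
-- left-to-right positional scan of the combined text, using a first-character bucket
-- index of (priority, marker) pairs and keeping the minimum matched rule priority
-- (objective: alternative algorithm, same asymptotic cost).


-- ===== PORT A =====
-- literal transliteration of the Python if-cascade: `sub in combined` is PySem.Str.isIn
def detect_game_type_py (file_listing : String) (log_text : String) : Option String :=
  let combined := PySem.Str.lower (file_listing ++ "\n" ++ log_text)
  if (["bukkit", "spigot", "paper", "purpur", "plugin.yml",
       "/data/plugins/", "/server/plugins/", "minecraft server",
       "[server thread/", "loading libraries"]).any (fun m => PySem.Str.isIn m combined) then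
    some "minecraft_java"
  else if (["bedrock_server", "behavior_packs", "resource_packs",
       "bedrock dedicated server"]).any (fun m => PySem.Str.isIn m combined) then
    some "minecraft_bedrock"
  else if (["/oxide/", "umod", "oxide.plugins", "rustdedicated",
       "rust dedicated server", "/oxide/plugins/"]).any (fun m => PySem.Str.isIn m combined) then
    some "rust"
  else if (["sourcemod", "metamod", "/addons/sourcemod/", "srcds",
       "source dedicated server", "/csgo/", "/garrysmod/"]).any (fun m => PySem.Str.isIn m combined) then
    some "source"
  else if (["valheim", "bepinex", "/bepinex/plugins/", "valheim dedicated"]).any (fun m => PySem.Str.isIn m combined) then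
    some "valheim"
  else if (["arkserver", "shootergame", "ark dedicated",
       "/shootergame/", "arksurvival"]).any (fun m => PySem.Str.isIn m combined) then
    some "ark"
  else if (["tshock", "terraria", "/serverplugins/", "terrariaserver"]).any (fun m => PySem.Str.isIn m combined) then
    some "terraria"
  else
    none

-- ===== PORT B =====
-- Source B's _RULES table
def bRules : List (String × List String) :=
  [("minecraft_java", ["bukkit", "spigot", "paper", "purpur", "plugin.yml",
      "/data/plugins/", "/server/plugins/", "minecraft server",
      "[server thread/", "loading libraries"]),
   ("minecraft_bedrock", ["bedrock_server", "behavior_packs", "resource_packs",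
      "bedrock dedicated server"]),
   ("rust", ["/oxide/", "umod", "oxide.plugins", "rustdedicated",
      "rust dedicated server", "/oxide/plugins/"]),
   ("source", ["sourcemod", "metamod", "/addons/sourcemod/", "srcds",
      "source dedicated server", "/csgo/", "/garrysmod/"]),
   ("valheim", ["valheim", "bepinex", "/bepinex/plugins/", "valheim dedicated"]),
   ("ark", ["arkserver", "shootergame", "ark dedicated",
      "/shootergame/", "arksurvival"]),
   ("terraria", ["tshock", "terraria", "/serverplugins/", "terrariaserver"])]

-- Source B's _PAIRS: flattened (priority, marker) pairs via enumerate
def bPairs : List (Int × String) :=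
  (PySem.List.enumerate bRules).flatMap (fun pg => pg.2.2.map (fun m => (pg.1, m)))

-- Source B's _BY_FIRST: first character of the marker -> pairs with that first character
-- (m[0] is exact as `headD ' '` because every marker in the table is nonempty)
def byFirst : PySem.Dict Char (List (Int × String)) :=
  bPairs.foldl (fun d pm => d.modify (pm.2.toList.headD ' ') [] (· ++ [pm])) PySem.Dict.empty

-- "if best is None or prio < best: best = prio"
def updMin (b : Option Int) (p : Int) : Option Int :=
  match b with
  | none => some p
  | some q => if p < q then some p else some q

-- the inner loop at position i: combined[i] is cl.getD i ' ' (0 ≤ i < len),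
-- combined.startswith(marker, i) is startswith on cl.drop i (exact for i ≤ len)
def scanPos (cl : List Char) (i : Nat) (b : Option Int) : Option Int :=
  (PySem.Dict.getD byFirst (cl.getD i ' ') []).foldl
    (fun b pm => if PySem.Chars.startswith (cl.drop i) pm.2.toList then updMin b pm.1 else b) b

def detect_game_type_py_alt (file_listing : String) (log_text : String) : Option String :=
  let combined := PySem.Str.lower (file_listing ++ "\n" ++ log_text)
  let cl := combined.toList
  let best := (List.range cl.length).foldl (fun b i => scanPos cl i b) none
  match best with
  | none => none
  | some p => (PySem.List.pyGet? bRules p).map Prod.fst   -- _RULES[best][0]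

-- ===== PRECONDITION & SPEC =====
def Spec_detect_game_type_py (file_listing : String) (log_text : String) (out : Option String) : Prop := out = detect_game_type_py_alt file_listing log_text
instance (file_listing : String) (log_text : String) (out : Option String) : Decidable (Spec_detect_game_type_py file_listing log_text out) := by unfold Spec_detect_game_type_py; infer_instance

-- ===== CLAIM (what is proved, stated in full; the proofs are below) =====
def Claim_equal_detect_game_type_py : Prop := ∀ (file_listing : String) (log_text : String), Dom_detect_game_type_py file_listing log_text → Spec_detect_game_type_py file_listing log_text (detect_game_type_py file_listing log_text)

-- ===== LEMMAS AND PROOFS =====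

-- group p matches (proof-side view of A's group conditions, Chars form)
def Mgrp (cl : List Char) (p : Nat) : Bool :=
  ((bRules.getD p ("", [])).2).any (fun m => PySem.Chars.isIn m.toList cl)

-- the priorities emitted by the inner loop at position i
def prios (cl : List Char) (i : Nat) : List Int :=
  ((PySem.Dict.getD byFirst (cl.getD i ' ') []).filter
    (fun pm => PySem.Chars.startswith (cl.drop i) pm.2.toList)).map Prod.fst

theorem foldl_if_updMin (cond : (Int × String) → Bool) :
    ∀ (l : List (Int × String)) (b : Option Int),
      l.foldl (fun b pm => if cond pm then updMin b pm.1 else b) b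
        = ((l.filter cond).map Prod.fst).foldl updMin b := by
  intro l
  induction l with
  | nil => intro b; rfl
  | cons pm rest ih =>
      intro b
      by_cases h : cond pm = true
      · simp [List.foldl_cons, h, ih]
      · simp [List.foldl_cons, h, ih]

theorem scanPos_eq (cl : List Char) (i : Nat) (b : Option Int) :
    scanPos cl i b = (prios cl i).foldl updMin b := by
  unfold scanPos prios
  exact foldl_if_updMin _ _ b

theorem scan_eq_flat (cl : List Char) :
    ∀ (n : Nat) (b : Option Int),
      (List.range n).foldl (fun b i => scanPos cl i b) b
        = ((List.range n).flatMap (prios cl)).foldl updMin b := by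
  intro n
  induction n with
  | zero => intro b; rfl
  | succ n ih =>
      intro b
      rw [List.range_succ, List.foldl_append, List.flatMap_append, List.foldl_append, ih]
      simp [scanPos_eq]

theorem foldl_updMin_some (l : List Int) : ∀ q : Int, l.foldl updMin (some q) = some (l.foldl min q) := by
  induction l with
  | nil => intro q; rfl
  | cons p rest ih =>
      intro q
      have h : updMin (some q) p = some (min q p) := by
        simp only [updMin, min_def]
        split_ifs <;> first | rfl | omega
      simp [List.foldl_cons, h, ih]

theorem foldl_updMin_none_eq_min? (l : List Int) : l.foldl updMin none = l.min? := by
  cases l with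
  | nil => rfl
  | cons a as => simp [List.foldl_cons, updMin, List.min?, foldl_updMin_some]

theorem find?_range_spec (P : Nat → Bool) :
    ∀ (n m : Nat), (List.range n).find? P = some m →
      m < n ∧ P m = true ∧ ∀ j < m, P j = false := by
  intro n
  induction n with
  | zero => intro m h; simp at h
  | succ n ih =>
      intro m h
      rw [List.range_succ, List.find?_append] at h
      cases hF : (List.range n).find? P with
      | some k =>
          rw [hF] at h
          simp only [Option.some_or] at h
          obtain rfl : k = m := Option.some.inj h
          obtain ⟨h1, h2, h3⟩ := ih _ hF
          exact ⟨by omega, h2, h3⟩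
      | none =>
          rw [hF] at h
          simp only [Option.none_or] at h
          by_cases hPn : P n = true
          · rw [List.find?_cons_of_pos hPn] at h
            obtain rfl : n = m := Option.some.inj h
            refine ⟨by omega, hPn, ?_⟩
            intro j hj
            have := List.find?_eq_none.mp hF j (List.mem_range.mpr hj)
            simpa using this
          · rw [List.find?_cons_of_neg (by simpa using hPn)] at h
            simp at h
  
theorem min?_eq_find? (E : List Int) (P : Nat → Bool) (n : Nat)
    (h : ∀ x, x ∈ E ↔ ∃ p : Nat, p < n ∧ P p = true ∧ x = (p : Int)) :
    E.min? = ((List.range n).find? P).map (fun p => (p : Int)) := by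
  cases hF : (List.range n).find? P with
  | none =>
      have hnone := List.find?_eq_none.mp hF
      have hE : E = [] := by
        refine List.eq_nil_iff_forall_not_mem.mpr (fun x hx => ?_)
        obtain ⟨p, h1, h2, rfl⟩ := (h _).mp hx
        exact absurd h2 (by simpa using hnone p (List.mem_range.mpr h1))
      simp [hE]
  | some m =>
      obtain ⟨hlt, hPm, hmin⟩ := find?_range_spec P n m hF
      refine List.min?_eq_some_iff.mpr ⟨(h _).mpr ⟨m, hlt, hPm, rfl⟩, ?_⟩
      intro b hb
      obtain ⟨p, hp1, hp2, rfl⟩ := (h b).mp hb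
      have : m ≤ p := by
        by_contra hmp
        exact absurd hp2 (by simp [hmin p (by omega)])
      simpa using Int.ofNat_le.mpr this

-- literal forms of the static tables (kernel-checked by rfl) and closed facts about them
set_option maxRecDepth 4000 in
theorem bPairs_eq : bPairs = [((0 : Int), "bukkit"), ((0 : Int), "spigot"), ((0 : Int), "paper"), ((0 : Int), "purpur"), ((0 : Int), "plugin.yml"), ((0 : Int), "/data/plugins/"), ((0 : Int), "/server/plugins/"), ((0 : Int), "minecraft server"), ((0 : Int), "[server thread/"), ((0 : Int), "loading libraries"), ((1 : Int), "bedrock_server"), ((1 : Int), "behavior_packs"), ((1 : Int), "resource_packs"), ((1 : Int), "bedrock dedicated server"), ((2 : Int), "/oxide/"), ((2 : Int), "umod"), ((2 : Int), "oxide.plugins"), ((2 : Int), "rustdedicated"), ((2 : Int), "rust dedicated server"), ((2 : Int), "/oxide/plugins/"), ((3 : Int), "sourcemod"), ((3 : Int), "metamod"), ((3 : Int), "/addons/sourcemod/"), ((3 : Int), "srcds"), ((3 : Int), "source dedicated server"), ((3 : Int), "/csgo/"), ((3 : Int), "/garrysmod/"), ((4 : Int), "valheim"), ((4 : Int), "bepinex"),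 ((4 : Int), "/bepinex/plugins/"), ((4 : Int), "valheim dedicated"), ((5 : Int), "arkserver"), ((5 : Int), "shootergame"), ((5 : Int), "ark dedicated"), ((5 : Int), "/shootergame/"), ((5 : Int), "arksurvival"), ((6 : Int), "tshock"), ((6 : Int), "terraria"), ((6 : Int), "/serverplugins/"), ((6 : Int), "terrariaserver")] := by rfl

set_option maxRecDepth 4000 in
theorem byFirst_eq : byFirst = PySem.Dict.mk [('b', [((0 : Int), "bukkit"), ((1 : Int), "bedrock_server"), ((1 : Int), "behavior_packs"), ((1 : Int), "bedrock dedicated server"), ((4 : Int), "bepinex")]), ('s', [((0 : Int), "spigot"), ((3 : Int), "sourcemod"), ((3 : Int), "srcds"), ((3 : Int), "source dedicated server"), ((5 : Int), "shootergame")]), ('p', [((0 : Int), "paper"), ((0 : Int), "purpur"), ((0 : Int), "plugin.yml")]), ('/', [((0 : Int), "/data/plugins/"), ((0 : Int), "/server/plugins/"), ((2 : Int), "/oxide/"), ((2 : Int), "/oxide/plugins/"), ((3 : Int), "/addons/sourcemod/"), ((3 : Int), "/csgo/"), ((3 : Int), "/garrysmod/"), ((4 : Int), "/bepinex/plugins/"),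 ((5 : Int), "/shootergame/"), ((6 : Int), "/serverplugins/")]), ('m', [((0 : Int), "minecraft server"), ((3 : Int), "metamod")]), ('[', [((0 : Int), "[server thread/")]), ('l', [((0 : Int), "loading libraries")]), ('r', [((1 : Int), "resource_packs"), ((2 : Int), "rustdedicated"), ((2 : Int), "rust dedicated server")]), ('u', [((2 : Int), "umod")]), ('o', [((2 : Int), "oxide.plugins")]), ('v', [((4 : Int), "valheim"), ((4 : Int), "valheim dedicated")]), ('a', [((5 : Int), "arkserver"), ((5 : Int), "ark dedicated"), ((5 : Int), "arksurvival")]), ('t', [((6 : Int), "tshock"), ((6 : Int), "terraria"), ((6 : Int), "terrariaserver")])] := by rfl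

set_option maxRecDepth 4000 in
theorem keys_eq : byFirst.keys = ['b', 's', 'p', '/', 'm', '[', 'l', 'r', 'u', 'o', 'v', 'a', 't'] := by
  rw [byFirst_eq]; rfl

set_option maxRecDepth 4000 in
theorem fact_pairs : ∀ pm ∈ bPairs, 0 ≤ pm.1 ∧ pm.1 < 7 ∧ pm.2.toList ≠ [] ∧
    pm.2 ∈ (bRules.getD pm.1.toNat ("", [])).2 ∧
    pm ∈ PySem.Dict.getD byFirst (pm.2.toList.headD ' ') [] := by
  rw [byFirst_eq, bPairs_eq]; decide

set_option maxRecDepth 4000 in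
theorem fact_groups : ∀ p : Nat, p < 7 → ∀ m ∈ (bRules.getD p ("", [])).2, ((p : Int), m) ∈ bPairs := by
  rw [bPairs_eq]; decide

set_option maxRecDepth 4000 in
theorem bucket_sub (ch : Char) : ∀ pm ∈ PySem.Dict.getD byFirst ch [], pm ∈ bPairs := by
  by_cases hc : byFirst.contains ch = true
  · have hk := (PySem.Dict.contains_iff_mem_keys byFirst ch).mp hc
    rw [keys_eq] at hk
    simp only [List.mem_cons, List.not_mem_nil, or_false] at hk
    rw [byFirst_eq, bPairs_eq]
    rcases hk with rfl|rfl|rfl|rfl|rfl|rfl|rfl|rfl|rfl|rfl|rfl|rfl|rfl <;> decide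
  · intro pm h
    rw [PySem.Dict.getD_of_not_contains byFirst [] (by simpa using hc)] at h
    cases h


theorem mem_flat_iff (cl : List Char) (x : Int) :
    x ∈ (List.range cl.length).flatMap (prios cl) ↔
      ∃ p : Nat, p < 7 ∧ Mgrp cl p = true ∧ x = (p : Int) := by
  constructor
  · intro hx
    obtain ⟨i, hi, hxi⟩ := List.mem_flatMap.mp hx
    unfold prios at hxi
    obtain ⟨pm, hpm, hfst⟩ := List.mem_map.mp hxi
    obtain ⟨hbucket, hsw⟩ := List.mem_filter.mp hpm
    obtain ⟨hnn, h7, hne, hgrp, _⟩ := fact_pairs pm (bucket_sub _ pm hbucket)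
    have hpref : pm.2.toList <+: cl.drop i := (PySem.Chars.startswith_iff _ _).mp hsw
    have hisIn : PySem.Chars.isIn pm.2.toList cl = true :=
      (PySem.Chars.exists_prefix_drop_iff_isIn pm.2.toList cl).mp ⟨i, hpref⟩
    refine ⟨pm.1.toNat, by omega, ?_, by omega⟩
    exact List.any_eq_true.mpr ⟨pm.2, hgrp, hisIn⟩
  · rintro ⟨p, hp7, hM, rfl⟩
    obtain ⟨m, hm, hisIn⟩ := List.any_eq_true.mp hM
    have hpm : ((p : Int), m) ∈ bPairs := fact_groups p hp7 m hm
    obtain ⟨_, _, hne, _, hbucket⟩ := fact_pairs _ hpm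
    obtain ⟨j, hpref⟩ := (PySem.Chars.exists_prefix_drop_iff_isIn m.toList cl).mpr hisIn
    have hjlen : j < cl.length := by
      by_contra hle
      rw [List.drop_eq_nil_of_le (by omega)] at hpref
      exact hne (List.prefix_nil.mp hpref)
    -- the character at position j is the marker's first character
    have hkey : cl.getD j ' ' = m.toList.headD ' ' := by
      obtain ⟨t, ht⟩ := hpref
      cases hml : m.toList with
      | nil => exact absurd hml hne
      | cons a as =>
          rw [hml] at ht
          have hdrop : (cl.drop j).head? = some a := by rw [← ht]; rfl
          rw [List.head?_drop] at hdrop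
          simp [List.getD_eq_getElem?_getD, hdrop]
    refine List.mem_flatMap.mpr ⟨j, List.mem_range.mpr hjlen, ?_⟩
    unfold prios
    refine List.mem_map.mpr ⟨((p : Int), m), List.mem_filter.mpr ⟨?_, ?_⟩, rfl⟩
    · rw [hkey]; exact hbucket
    · exact (PySem.Chars.startswith_iff _ _).mpr hpref

-- the scan computes the first matching group index, in priority order
theorem scan_eq_find (cl : List Char) :
    (List.range cl.length).foldl (fun b i => scanPos cl i b) none
      = ((List.range 7).find? (Mgrp cl)).map (fun p => (p : Int)) := by
  rw [scan_eq_flat cl cl.length none, foldl_updMin_none_eq_min?]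
  exact min?_eq_find? _ _ 7 (mem_flat_iff cl)

set_option maxHeartbeats 2000000 in
theorem core_eq (s : String) :
    (if (["bukkit", "spigot", "paper", "purpur", "plugin.yml",
         "/data/plugins/", "/server/plugins/", "minecraft server",
         "[server thread/", "loading libraries"]).any (fun m => PySem.Str.isIn m s) then
      some "minecraft_java"
    else if (["bedrock_server", "behavior_packs", "resource_packs",
         "bedrock dedicated server"]).any (fun m => PySem.Str.isIn m s) then
      some "minecraft_bedrock"
    else if (["/oxide/", "umod", "oxide.plugins", "rustdedicated",
         "rust dedicated server", "/oxide/plugins/"]).any (fun m => PySem.Str.isIn m s) then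
      some "rust"
    else if (["sourcemod", "metamod", "/addons/sourcemod/", "srcds",
         "source dedicated server", "/csgo/", "/garrysmod/"]).any (fun m => PySem.Str.isIn m s) then
      some "source"
    else if (["valheim", "bepinex", "/bepinex/plugins/", "valheim dedicated"]).any (fun m => PySem.Str.isIn m s) then
      some "valheim"
    else if (["arkserver", "shootergame", "ark dedicated",
         "/shootergame/", "arksurvival"]).any (fun m => PySem.Str.isIn m s) then
      some "ark"
    else if (["tshock", "terraria", "/serverplugins/", "terrariaserver"]).any (fun m => PySem.Str.isIn m s) then
      some "terraria"
    else
      none)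
    = (match (List.range s.toList.length).foldl (fun b i => scanPos s.toList i b) none with
       | none => none
       | some p => (PySem.List.pyGet? bRules p).map Prod.fst) := by
  rw [scan_eq_find]
  have e0 : (["bukkit", "spigot", "paper", "purpur", "plugin.yml",
       "/data/plugins/", "/server/plugins/", "minecraft server",
       "[server thread/", "loading libraries"]).any (fun m => PySem.Str.isIn m s) = Mgrp s.toList 0 := rfl
  have e1 : (["bedrock_server", "behavior_packs", "resource_packs",
       "bedrock dedicated server"]).any (fun m => PySem.Str.isIn m s) = Mgrp s.toList 1 := rfl
  have e2 : (["/oxide/", "umod", "oxide.plugins", "rustdedicated",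
       "rust dedicated server", "/oxide/plugins/"]).any (fun m => PySem.Str.isIn m s) = Mgrp s.toList 2 := rfl
  have e3 : (["sourcemod", "metamod", "/addons/sourcemod/", "srcds",
       "source dedicated server", "/csgo/", "/garrysmod/"]).any (fun m => PySem.Str.isIn m s) = Mgrp s.toList 3 := rfl
  have e4 : (["valheim", "bepinex", "/bepinex/plugins/", "valheim dedicated"]).any (fun m => PySem.Str.isIn m s) = Mgrp s.toList 4 := rfl
  have e5 : (["arkserver", "shootergame", "ark dedicated",
       "/shootergame/", "arksurvival"]).any (fun m => PySem.Str.isIn m s) = Mgrp s.toList 5 := rfl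
  have e6 : (["tshock", "terraria", "/serverplugins/", "terrariaserver"]).any (fun m => PySem.Str.isIn m s) = Mgrp s.toList 6 := rfl
  rw [e0, e1, e2, e3, e4, e5, e6]
  have hr : List.range 7 = [0, 1, 2, 3, 4, 5, 6] := rfl
  rw [hr]
  cases h0 : Mgrp s.toList 0 <;> cases h1 : Mgrp s.toList 1 <;> cases h2 : Mgrp s.toList 2 <;>
    cases h3 : Mgrp s.toList 3 <;> cases h4 : Mgrp s.toList 4 <;> cases h5 : Mgrp s.toList 5 <;>
    cases h6 : Mgrp s.toList 6 <;>
    simp [List.find?, h0, h1, h2, h3, h4, h5, h6, PySem.List.pyGet?, PySem.List.pyIdx?, bRules]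

-- ===== VERDICT (by name: the statement is the Claim_ definition above) =====
theorem detect_game_type_py_spec : Claim_equal_detect_game_type_py := by
  intro file_listing log_text _
  unfold Spec_detect_game_type_py detect_game_type_py detect_game_type_py_alt
  exact core_eq _
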